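-- pv_equiv track=rewrite | github.com/Computerization/c13n | writer.py | check_balanced_braces
-- ===== SOURCE A (Python) =====
-- def check_balanced_braces(latex_str: str) -> (bool, list):
--     stack = []
--     errors = []
--     for index, char in enumerate(latex_str):
--         if char == '{':
--             stack.append(index)
--         elif char == '}':
--             if not stack:
--                 errors.append(f"位置 {index}: 右大括号 '}}' 没有对应的左大括号")
--             else:
--                 stack.pop()
--     if stack:
--         for pos in stack:
--             errors.append(f"位置 {pos}: 左大括号 '{{' 没有对应的右大括号")
--     return (len(errors) == 0), errors
-- ===== SOURCE B (Python) =====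
-- def check_balanced_braces(latex_str: str) -> (bool, list):
--     errors = []
--     balance = 0
--     for index, char in enumerate(latex_str):
--         if char == '{':
--             balance += 1
--         elif char == '}':
--             if balance > 0:
--                 balance -= 1
--             else:
--                 errors.append(f"位置 {index}: 右大括号 '}}' 没有对应的左大括号")
--     closes = 0
--     opens = []
--     for index, char in reversed(list(enumerate(latex_str))):
--         if char == '}':
--             closes += 1
--         elif char == '{':
--             if closes > 0:
--                 closes -= 1
--             else:
--                 opens.append(index)
--     for pos in reversed(opens):
--         errors.append(f"位置 {pos}: 左大括号 '{{' 没有对应的右大括号")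
--     return (len(errors) == 0), errors
-- ===== Notes on version B (the rewrite author's own statement) =====
-- stated objective: alternative
-- what changed: Replaces A's single pass with an index stack (plus a leftover-stack sweep) by two stackless directional counting passes: a left-to-right balance counter collecting unmatched-close errors, and a right-to-left close counter collecting unmatched-open positions (reversed to ascending order).
import Mathlib
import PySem

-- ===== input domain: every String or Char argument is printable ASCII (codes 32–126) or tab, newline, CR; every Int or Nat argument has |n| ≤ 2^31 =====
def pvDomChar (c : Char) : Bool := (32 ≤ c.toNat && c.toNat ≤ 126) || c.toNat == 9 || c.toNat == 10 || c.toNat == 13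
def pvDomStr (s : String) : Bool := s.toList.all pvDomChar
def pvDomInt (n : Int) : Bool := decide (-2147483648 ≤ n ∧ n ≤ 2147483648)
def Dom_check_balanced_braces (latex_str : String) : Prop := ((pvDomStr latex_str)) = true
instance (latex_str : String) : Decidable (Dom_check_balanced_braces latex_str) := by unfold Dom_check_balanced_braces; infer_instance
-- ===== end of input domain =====

-- B replaces A's index stack by two directional counting passes (close errors left-to-right
-- with a balance counter, unmatched opens right-to-left with a close counter); alternative
-- decomposition, same O(n) cost.

-- shared message formatting (the two f-strings)
def pvMsgClose (i : Int) : String := "位置 " ++ PySem.Int.toStr i ++ ": 右大括号 '}' 没有对应的左大括号"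
def pvMsgOpen (p : Int) : String := "位置 " ++ PySem.Int.toStr p ++ ": 左大括号 '{' 没有对应的右大括号"

-- ===== PORT A =====
def pvAStep (st : List Int × List String) (ic : Int × Char) : List Int × List String :=
  if ic.2 = '{' then (st.1 ++ [ic.1], st.2)
  else if ic.2 = '}' then
    if st.1 = [] then (st.1, st.2 ++ [pvMsgClose ic.1])
    else (st.1.dropLast, st.2)
  else st

def check_balanced_braces (latex_str : String) : Bool × List String :=
  let r := (PySem.List.enumerate latex_str.toList).foldl pvAStep ([], [])
  let errors := r.2 ++ r.1.map pvMsgOpen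
  (errors.length == 0, errors)

-- ===== PORT B =====
def pvB1Step (st : Int × List String) (ic : Int × Char) : Int × List String :=
  if ic.2 = '{' then (st.1 + 1, st.2)
  else if ic.2 = '}' then
    if st.1 > 0 then (st.1 - 1, st.2) else (st.1, st.2 ++ [pvMsgClose ic.1])
  else st

def pvB2Step (st : Int × List Int) (ic : Int × Char) : Int × List Int :=
  if ic.2 = '}' then (st.1 + 1, st.2)
  else if ic.2 = '{' then
    if st.1 > 0 then (st.1 - 1, st.2) else (st.1, st.2 ++ [ic.1])
  else st

def check_balanced_braces_alt (latex_str : String) : Bool × List String :=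
  let enum := PySem.List.enumerate latex_str.toList
  let p1 := enum.foldl pvB1Step (0, [])
  let p2 := enum.reverse.foldl pvB2Step (0, [])
  let errors := p1.2 ++ (p2.2.reverse.map pvMsgOpen)
  (errors.length == 0, errors)

-- ===== PRECONDITION & SPEC =====
def Spec_check_balanced_braces (latex_str : String) (out : Bool × List String) : Prop := out = check_balanced_braces_alt latex_str
instance (latex_str : String) (out : Bool × List String) : Decidable (Spec_check_balanced_braces latex_str out) := by unfold Spec_check_balanced_braces; infer_instance

-- ===== CLAIM (what is proved, stated in full; the proofs are below) =====
def Claim_equal_check_balanced_braces : Prop := ∀ (latex_str : String), Dom_check_balanced_braces latex_str → Spec_check_balanced_braces latex_str (check_balanced_braces latex_str)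

-- ===== LEMMAS AND PROOFS =====

-- pass 1 invariant: the balance counter tracks the stack length, errors coincide
theorem pv_p1 (l : List (Int × Char)) : ∀ (s : List Int) (e : List String),
    l.foldl pvB1Step ((s.length : Int), e) =
      (((l.foldl pvAStep (s, e)).1.length : Int), (l.foldl pvAStep (s, e)).2) := by
  induction l with
  | nil => intro s e; simp
  | cons x t ih =>
    intro s e
    simp only [List.foldl_cons]
    by_cases h1 : x.2 = '{'
    · have hstep : pvB1Step ((s.length : Int), e) x = (((s ++ [x.1]).length : Int), e) := by
        simp [pvB1Step, h1]
      rw [hstep, ih]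
      simp [pvAStep, h1]
    · by_cases h2 : x.2 = '}'
      · by_cases h3 : s = []
        · have hstep : pvB1Step ((s.length : Int), e) x
              = ((([] : List Int).length : Int), e ++ [pvMsgClose x.1]) := by
            simp [pvB1Step, h2, h3]
          rw [hstep, ih]
          simp [pvAStep, h2, h3]
        · have hlen : 0 < s.length := List.length_pos_of_ne_nil h3
          have hpos : (0 : Int) < (s.length : Int) := by exact_mod_cast hlen
          have hcast : (s.length : Int) - 1 = ((s.dropLast).length : Int) := by
            rw [List.length_dropLast]; omega
          have hstep : pvB1Step ((s.length : Int), e) x = (((s.dropLast).length : Int), e) := by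
            simp [pvB1Step, h2, hcast]
            exact h3
          rw [hstep, ih]
          simp [pvAStep, h2, h3]
      · have hstep : pvB1Step ((s.length : Int), e) x = ((s.length : Int), e) := by
          simp [pvB1Step, h1, h2]
        rw [hstep, ih]
        simp [pvAStep, h1, h2]

-- a single pass-2 step only appends to the accumulator
theorem pv_b2step_acc (c : Int) (acc : List Int) (x : Int × Char) :
    pvB2Step (c, acc) x = ((pvB2Step (c, []) x).1, acc ++ (pvB2Step (c, []) x).2) := by
  unfold pvB2Step
  split_ifs <;> simp

-- pass 2 only appends to its accumulator
theorem pv_p2_acc (l : List (Int × Char)) : ∀ (c : Int) (acc : List Int),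
    l.foldl pvB2Step (c, acc) =
      ((l.foldl pvB2Step (c, [])).1, acc ++ (l.foldl pvB2Step (c, [])).2) := by
  induction l with
  | nil => intro c acc; simp
  | cons x t ih =>
    intro c acc
    simp only [List.foldl_cons]
    rw [pv_b2step_acc c acc x]
    rcases h : pvB2Step (c, []) x with ⟨c', d⟩
    rw [ih c' (acc ++ d), ih c' d]
    simp

-- main lemma: the right-to-left pass started with c pending closes collects, in descending
-- order, the leftover stack of A minus its last c entries; its counter ends at
-- (c - |stack|) + (#close errors), all in truncated ℕ-arithmetic.
theorem pv_p2 (l : List (Int × Char)) : ∀ (c : Nat),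
    l.reverse.foldl pvB2Step ((c : Int), []) =
      ((((c - (l.foldl pvAStep ([], [])).1.length : Nat) : Int) + ((l.foldl pvAStep ([], [])).2.length : Int)),
        (((l.foldl pvAStep ([], [])).1.take ((l.foldl pvAStep ([], [])).1.length - c)).reverse)) := by
  induction l using List.reverseRecOn with
  | nil => intro c; simp
  | append_singleton t x ih =>
    intro c
    have hrev : (t ++ [x]).reverse = x :: t.reverse := by simp
    rw [hrev, List.foldl_cons, List.foldl_append]
    simp only [List.foldl_cons, List.foldl_nil]
    set F := t.foldl pvAStep ([], []) with hF
    by_cases h1 : x.2 = '{'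
    · have hA : pvAStep F x = (F.1 ++ [x.1], F.2) := by simp [pvAStep, h1]
      rw [hA]
      by_cases hc : 0 < c
      · have hpos : (0 : Int) < (c : Int) := by exact_mod_cast hc
        have hcast : (c : Int) - 1 = ((c - 1 : Nat) : Int) := by omega
        have hstep : pvB2Step ((c : Int), []) x = (((c - 1 : Nat) : Int), []) := by
          simp [pvB2Step, h1, hcast]
          omega
        rw [hstep, ih, Prod.mk.injEq]
        refine ⟨by simp; omega, ?_⟩
        have hle : (F.1 ++ [x.1]).length - c ≤ F.1.length := by simp; omega
        rw [List.take_append_of_le_length hle]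
        have heq : (F.1 ++ [x.1]).length - c = F.1.length - (c - 1) := by simp; omega
        rw [heq]
      · have hc0 : c = 0 := by omega
        subst hc0
        have hstep : pvB2Step (((0 : Nat) : Int), []) x = ((0 : Int), [x.1]) := by
          simp [pvB2Step, h1]
        rw [hstep, pv_p2_acc]
        have ih0 := ih 0
        simp only [Nat.cast_zero] at ih0 ⊢
        rw [ih0, Prod.mk.injEq]
        constructor
        · simp
        · have h4 : List.take ((F.1 ++ [x.1]).length - 0) (F.1 ++ [x.1]) = F.1 ++ [x.1] :=
            List.take_of_length_le (by simp)
          rw [h4]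
          simp
    · by_cases h2 : x.2 = '}'
      · have hstep : pvB2Step ((c : Int), []) x = (((c + 1 : Nat) : Int), []) := by
          simp [pvB2Step, h2]
        rw [hstep, ih, Prod.mk.injEq]
        by_cases h3 : F.1 = []
        · have hA : pvAStep F x = (F.1, F.2 ++ [pvMsgClose x.1]) := by
            simp [pvAStep, h2, h3]
          rw [hA]
          refine ⟨?_, by simp [h3]⟩
          simp [h3]; omega
        · have hA : pvAStep F x = (F.1.dropLast, F.2) := by
            simp [pvAStep, h2, h3]
          rw [hA]
          have hpos : 0 < F.1.length := List.length_pos_of_ne_nil h3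
          constructor
          · simp only [List.length_dropLast]; omega
          · rw [List.dropLast_eq_take, List.take_take]
            congr 2
            simp
            omega
      · have hA : pvAStep F x = F := by simp [pvAStep, h1, h2]
        have hstep : pvB2Step ((c : Int), []) x = ((c : Int), []) := by
          simp [pvB2Step, h1, h2]
        rw [hA, hstep, ih]

theorem pv_eq (latex_str : String) :
    check_balanced_braces latex_str = check_balanced_braces_alt latex_str := by
  unfold check_balanced_braces check_balanced_braces_alt
  set l := PySem.List.enumerate latex_str.toList with hl
  have h1 := pv_p1 l ([] : List Int) ([] : List String)
  have h2 := pv_p2 l 0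
  simp only [List.length_nil, Nat.cast_zero] at h1
  simp only [Nat.cast_zero, Nat.sub_zero, List.take_length] at h2
  simp only [h1, h2, List.reverse_reverse]

-- ===== VERDICT (by name: the statement is the Claim_ definition above) =====
theorem check_balanced_braces_spec : Claim_equal_check_balanced_braces := by
  intro s _
  unfold Spec_check_balanced_braces
  exact pv_eq s
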